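-- pv_equiv track=rewrite | github.com/mars71003219/ar | rtmo_gcn_pipeline/rtmo_pose_track/_legacy_backup/separated_pose_pipeline.py | _apply_temporal_padding
-- ===== SOURCE A (Python) =====
-- from typing import Dict, List, Optional, Tuple
--
-- def _apply_temporal_padding(poses: List, target_length: int) -> List:
--     """시간적 패딩 적용 - modulo 루핑 방식"""
--     if len(poses) >= target_length:
--         return poses[:target_length]
--
--     if not poses:
--         # 빈 포즈 리스트인 경우 빈 프레임으로 채움
--         return [[]] * target_length
--
--     # modulo 루핑 방식으로 패딩
--     padded_poses = []
--
--     for i in range(target_length):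
--         # 순환 인덱스 사용 (비디오 전체를 반복)
--         pose_idx = i % len(poses)
--         padded_poses.append(poses[pose_idx])
--
--     return padded_poses
-- ===== SOURCE B (Python) =====
-- def _apply_temporal_padding(poses, target_length):
--     """Pad pose list to target length by whole-list repetition plus a remainder slice."""
--     if len(poses) >= target_length:
--         return poses[:target_length]
--     if not poses:
--         return [[]] * target_length
--     q, r = divmod(target_length, len(poses))
--     return poses * q + poses[:r]
-- ===== Notes on version B (the rewrite author's own statement) =====
-- stated objective: simpler
-- what changed: The per-index modulo loop is replaced by a closed construction: q,r = divmod(target_length, len(poses)) and the result is poses*q + poses[:r].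
import Mathlib
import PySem

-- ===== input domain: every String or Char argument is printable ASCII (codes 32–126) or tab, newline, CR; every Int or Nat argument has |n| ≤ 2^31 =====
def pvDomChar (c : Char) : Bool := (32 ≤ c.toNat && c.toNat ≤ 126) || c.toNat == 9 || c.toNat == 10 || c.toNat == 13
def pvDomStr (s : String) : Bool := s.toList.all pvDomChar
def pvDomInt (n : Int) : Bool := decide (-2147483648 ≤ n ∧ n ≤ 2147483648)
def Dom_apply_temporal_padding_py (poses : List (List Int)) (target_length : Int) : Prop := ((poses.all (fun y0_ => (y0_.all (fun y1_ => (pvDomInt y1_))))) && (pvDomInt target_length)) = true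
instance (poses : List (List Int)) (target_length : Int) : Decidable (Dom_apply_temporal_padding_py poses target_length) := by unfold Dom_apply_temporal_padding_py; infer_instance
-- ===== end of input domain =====

-- B replaces A's per-index modulo-cycling loop by a closed construction (whole-list repetition plus a remainder slice); objective: simpler.

-- ===== PORT A =====
-- literal port of A: guard, empty-list guard, then a loop over range(target_length) appending poses[i % len(poses)]
def apply_temporal_padding_py (poses : List (List Int)) (target_length : Int) : List (List Int) :=
  if target_length ≤ (poses.length : Int) then
    PySem.List.slice poses none (some target_length)
  else if poses = [] then
    List.replicate target_length.toNat []   -- [[]] * target_length (target_length > len(poses) = 0 here)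
  else
    (PySem.List.pyRange 0 target_length 1).foldl
      (fun acc i => acc ++ [PySem.List.pyGetD poses (PySem.Int.mod i (poses.length : Int)) []]) []
      -- poses[i % len(poses)]: index always in range here, so pyGetD is exact

-- ===== PORT B =====
-- port of B: same two guards, then q,r = divmod(target_length, len(poses)); poses * q + poses[:r]
def apply_temporal_padding_py_alt (poses : List (List Int)) (target_length : Int) : List (List Int) :=
  if target_length ≤ (poses.length : Int) then
    PySem.List.slice poses none (some target_length)
  else if poses = [] then
    List.replicate target_length.toNat []
  else
    let q := PySem.Int.floordiv target_length (poses.length : Int)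
    let r := PySem.Int.mod target_length (poses.length : Int)
    (List.replicate q.toNat poses).flatten ++ PySem.List.slice poses none (some r)

-- ===== PRECONDITION & SPEC =====
def Spec_apply_temporal_padding_py (poses : List (List Int)) (target_length : Int) (out : List (List Int)) : Prop := out = apply_temporal_padding_py_alt poses target_length
instance (poses : List (List Int)) (target_length : Int) (out : List (List Int)) : Decidable (Spec_apply_temporal_padding_py poses target_length out) := by unfold Spec_apply_temporal_padding_py; infer_instance

-- ===== CLAIM (what is proved, stated in full; the proofs are below) =====
def Claim_equal_apply_temporal_padding_py : Prop := ∀ (poses : List (List Int)) (target_length : Int), Dom_apply_temporal_padding_py poses target_length → Spec_apply_temporal_padding_py poses target_length (apply_temporal_padding_py poses target_length)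

-- ===== LEMMAS AND PROOFS =====

-- cyclic indexing over q full copies plus a remainder equals repetition plus a prefix
lemma cyclic_map_range (poses : List (List Int)) :
    ∀ (q r : Nat), r ≤ poses.length →
      (List.range (q * poses.length + r)).map (fun k => poses.getD (k % poses.length) []) =
        (List.replicate q poses).flatten ++ poses.take r := by
  intro q
  induction q with
  | zero =>
    intro r hr
    simp only [Nat.zero_mul, Nat.zero_add, List.replicate_zero, List.flatten_nil, List.nil_append]
    apply List.ext_getElem
    · simp [Nat.min_eq_left hr]
    · intro i h1 h2
      have hi : i < r := by simpa using h1
      have hin : i < poses.length := lt_of_lt_of_le hi hr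
      simp [Nat.mod_eq_of_lt hin, hin]
  | succ q ih =>
    intro r hr
    have hsplit : (q + 1) * poses.length + r = poses.length + (q * poses.length + r) := by ring
    rw [hsplit, List.range_add, List.map_append, List.map_map]
    have h1 : (List.range poses.length).map (fun k => poses.getD (k % poses.length) []) = poses := by
      apply List.ext_getElem
      · simp
      · intro i hA hB
        have hin : i < poses.length := by simpa using hA
        simp [Nat.mod_eq_of_lt hin, hin]
    have h2 : ((fun k => poses.getD (k % poses.length) []) ∘ (fun k => poses.length + k)) =
        (fun k => poses.getD (k % poses.length) []) := by
      funext k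
      simp [Function.comp, Nat.add_mod_left]
    rw [h1, h2, ih r hr]
    simp [List.replicate_succ, List.flatten_cons, List.append_assoc]

-- ===== VERDICT (by name: the statement is the Claim_ definition above) =====
theorem apply_temporal_padding_py_spec : Claim_equal_apply_temporal_padding_py := by
  unfold Claim_equal_apply_temporal_padding_py
  intro poses target_length _
  unfold Spec_apply_temporal_padding_py apply_temporal_padding_py apply_temporal_padding_py_alt
  by_cases hle : target_length ≤ (poses.length : Int)
  · simp [hle]
  · simp only [hle, if_false]
    by_cases hnil : poses = []
    · simp [hnil]
    · simp only [hnil, if_false]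
      have hn0 : 0 < poses.length := List.length_pos_iff.mpr hnil
      have hT : 0 < target_length := by
        have : (0:Int) ≤ poses.length := by positivity
        omega
      -- abbreviations on the Nat side
      set n := poses.length with hndef
      set t := target_length.toNat with htdef
      have htc : target_length = (t : Int) := by omega
      -- A side: foldl → map over range
      rw [PySem.List.foldl_append_singleton_eq_map]
      rw [PySem.List.pyRange_one]
      have hsub : (target_length - 0).toNat = t := by omega
      rw [hsub]
      rw [List.nil_append, List.map_map]
      have hmapA : (List.range t).map
          ((fun i => PySem.List.pyGetD poses (PySem.Int.mod i (n : Int)) []) ∘ (fun k : Nat => 0 + (k:Int))) =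
          (List.range t).map (fun k => poses.getD (k % n) []) := by
        apply List.map_congr_left
        intro k _
        show PySem.List.pyGetD poses (PySem.Int.mod (0 + (k:Int)) (n : Int)) [] = _
        have h0 : (0:Int) + (k:Int) = ((k:Nat) : Int) := by ring
        rw [h0, PySem.Int.mod_natCast, PySem.List.pyGetD_natCast]
      rw [hmapA]
      -- B side: floordiv/mod on casts, slice → take
      have hq : PySem.Int.floordiv target_length (n : Int) = ((t / n : Nat) : Int) := by
        rw [htc]; exact PySem.Int.floordiv_natCast t n
      have hr : PySem.Int.mod target_length (n : Int) = ((t % n : Nat) : Int) := by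
        rw [htc]; exact PySem.Int.mod_natCast t n
      rw [hq, hr, PySem.List.slice_to poses (by exact_mod_cast Nat.zero_le (t % n))]
      simp only [Int.toNat_natCast]
      have hdecomp : t = (t / n) * n + t % n := by
        rw [Nat.mul_comm]; exact (Nat.div_add_mod t n).symm
      calc (List.range t).map (fun k => poses.getD (k % n) [])
          = (List.range ((t / n) * n + t % n)).map (fun k => poses.getD (k % n) []) := by
            rw [← hdecomp]
        _ = (List.replicate (t / n) poses).flatten ++ poses.take (t % n) :=
            cyclic_map_range poses (t / n) (t % n) (le_of_lt (Nat.mod_lt t hn0))
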